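-- pv_equiv track=rewrite | github.com/hanna9221/Codility-exercises | Codility/20200222_Palladium 2020.py | solution
-- ===== SOURCE A (Python) =====
-- def solution(H):
--     N = len(H)
--     leftstart, rightstart = [0]*N, [0]*N
--     leftstart[0] = H[0]
--     rightstart[-1] = H[-1]
--     for i in range(1, N):
--         if H[i] > leftstart[i-1]:
--             leftstart[i] = H[i]
--         else:
--             leftstart[i] = leftstart[i-1]
--         if H[N-i-1] > rightstart[N-i]:
--             rightstart[N-i-1] = H[N-i-1]
--         else:
--             rightstart[-i-1] = rightstart[-i]
--
--     res = rightstart[0]*N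
--     for i in range(1, N):
--         res = min(res, leftstart[i-1]*i + rightstart[i]*(N-i))
--     return res
-- ===== SOURCE B (Python) =====
-- def solution(H):
--     N = len(H)
--     top = max(H) * N
--
--     def go(l, r, pl, sr):
--         # minimal split cost over split points strictly between l and r;
--         # pl = max(H[:l]) (None if l == 0), sr = max(H[r:]) (None if r == N).
--         if r - l <= 1:
--             return None
--         mid = (l + r) // 2
--         mL = max(H[l:mid])
--         mR = max(H[mid:r])
--         p = mL if pl is None else max(pl, mL)
--         s = mR if sr is None else max(sr, mR)
--         c = p * mid + s * (N - mid)
--         bL = go(l, mid, pl, s)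
--         bR = go(mid, r, p, sr)
--         best = c if bL is None else min(c, bL)
--         best = best if bR is None else min(best, bR)
--         return best
--
--     b = go(0, N, None, None)
--     return top if b is None else min(top, b)
-- ===== Notes on version B (the rewrite author's own statement) =====
-- stated objective: alternative
-- what changed: B replaces A's two precomputed prefix/suffix maximum tables and linear scans by a divide-and-conquer recursion: each node splits the index range at its midpoint, computes the two half maxima, evaluates the midpoint split cost from the outside maxima passed down, and combines with the recursive bests of the halves; no arrays are built.
import Mathlib
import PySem

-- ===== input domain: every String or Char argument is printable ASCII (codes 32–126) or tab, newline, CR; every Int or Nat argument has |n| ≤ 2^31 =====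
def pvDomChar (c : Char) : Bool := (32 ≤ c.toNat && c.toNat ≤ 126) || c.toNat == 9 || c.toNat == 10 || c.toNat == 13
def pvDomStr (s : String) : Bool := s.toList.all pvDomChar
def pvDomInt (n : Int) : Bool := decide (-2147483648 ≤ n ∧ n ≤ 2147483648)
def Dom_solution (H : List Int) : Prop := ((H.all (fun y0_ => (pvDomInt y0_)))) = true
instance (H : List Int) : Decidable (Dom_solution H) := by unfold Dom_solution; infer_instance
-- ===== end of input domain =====

-- B replaces A's two precomputed prefix/suffix maximum tables by a divide-and-conquer
-- recursion over the index range (outside maxima passed down, half maxima computed per node).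

-- ===== PORT A =====
def solution (H : List Int) : Int :=
  let N : Int := PySem.List.len H
  let leftstart0 := PySem.List.pySetD (List.replicate N.toNat (0 : Int)) 0 (PySem.List.pyGetD H 0 0)
  let rightstart0 := PySem.List.pySetD (List.replicate N.toNat (0 : Int)) (-1) (PySem.List.pyGetD H (-1) 0)
  let p := (PySem.List.pyRange 1 N 1).foldl
    (fun (p : List Int × List Int) i =>
      let ls := if PySem.List.pyGetD H i 0 > PySem.List.pyGetD p.1 (i - 1) 0
                then PySem.List.pySetD p.1 i (PySem.List.pyGetD H i 0)
                else PySem.List.pySetD p.1 i (PySem.List.pyGetD p.1 (i - 1) 0)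
      let rs := if PySem.List.pyGetD H (N - i - 1) 0 > PySem.List.pyGetD p.2 (N - i) 0
                then PySem.List.pySetD p.2 (N - i - 1) (PySem.List.pyGetD H (N - i - 1) 0)
                else PySem.List.pySetD p.2 (-i - 1) (PySem.List.pyGetD p.2 (-i) 0)
      (ls, rs)) (leftstart0, rightstart0)
  let leftstart := p.1
  let rightstart := p.2
  (PySem.List.pyRange 1 N 1).foldl
    (fun res i =>
      min res (PySem.List.pyGetD leftstart (i - 1) 0 * i + PySem.List.pyGetD rightstart i 0 * (N - i)))
    (PySem.List.pyGetD rightstart 0 0 * N)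

-- ===== PORT B =====
-- go(l, r, pl, sr) of Source B; the extra Nat argument is FUEL making the recursion structural
-- (always called with fuel ≥ r - l, so the fuel-exhausted branch is never taken on such calls).
def goB (H : List Int) (N : Int) : Nat → Int → Int → Option Int → Option Int → Option Int
  | 0, _, _, _, _ => none
  | fuel+1, l, r, pl, sr =>
    if r - l ≤ 1 then none
    else
      let mid := PySem.Int.floordiv (l + r) 2
      let mL := (PySem.List.max? (PySem.List.slice H (some l) (some mid)) (fun y => y)).getD 0
      let mR := (PySem.List.max? (PySem.List.slice H (some mid) (some r)) (fun y => y)).getD 0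
      let p := match pl with | none => mL | some x => max x mL
      let s := match sr with | none => mR | some x => max x mR
      let c := p * mid + s * (N - mid)
      let bL := goB H N fuel l mid pl (some s)
      let bR := goB H N fuel mid r (some p) sr
      let best := match bL with | none => c | some x => min c x
      let best := match bR with | none => best | some x => min best x
      some best

def solution_alt (H : List Int) : Int :=
  let N : Int := PySem.List.len H
  let top := (PySem.List.max? H (fun y => y)).getD 0 * N   -- max(H); raises on [] (outside Pre_), default 0 there
  let b := goB H N N.toNat 0 N none none
  match b with
  | none => top
  | some v => min top v

-- ===== PRECONDITION & SPEC =====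
-- Pre_ excludes only the empty list, on which A raises IndexError (H[0]) and B raises ValueError (max([])).
def Pre_solution (H : List Int) : Prop := H ≠ []
instance (H : List Int) : Decidable (Pre_solution H) := by unfold Pre_solution; infer_instance
def pvWitness_solution : List Int := [3, 1, 2]
def Spec_solution (H : List Int) (out : Int) : Prop := out = solution_alt H
instance (H : List Int) (out : Int) : Decidable (Spec_solution H out) := by unfold Spec_solution; infer_instance

-- ===== CLAIM (what is proved, stated in full; the proofs are below) =====
def Claim_equal_solution : Prop := ∀ (H : List Int), Dom_solution H → Pre_solution H → Spec_solution H (solution H)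

-- ===== LEMMAS AND PROOFS =====

-- prefix maximum pvPm H k = max H[0..k], suffix maximum pvSm H k = max H[k..]
def pvPm (H : List Int) : Nat → Int
  | 0 => H.getD 0 0
  | k+1 => max (pvPm H k) (H.getD (k+1) 0)
def pvSm (H : List Int) (k : Nat) : Int := (H.drop k).foldr max (H.getD (H.length - 1) 0)
def pvL (H : List Int) (k : Nat) : List Int :=
  (List.range H.length).map (fun j => if j ≤ k then pvPm H j else (0:Int))
def pvR (H : List Int) (k : Nat) : List Int :=
  (List.range H.length).map (fun (j : Nat) => if (H.length:Int) - 1 - (k:Int) ≤ (j:Int) then pvSm H j else (0:Int))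
-- segment maximum of H[a..b-1] (seeded with H[a]; the duplicate seed is absorbed by max)
def pvSeg (H : List Int) (a b : Nat) : Int := ((H.drop a).take (b - a)).foldl max (H.getD a 0)
-- split cost at i, and the minimal cost over split points strictly between l and r
def pvCost (H : List Int) (i : Nat) : Int :=
  pvPm H (i - 1) * (i : Int) + pvSm H i * ((H.length : Int) - (i : Int))
def pvBest (H : List Int) (l r : Nat) : Option Int :=
  ((List.range' (l+1) (r - l - 1)).map (pvCost H)).min?
def pvPre (H : List Int) (l : Nat) : Option Int := if l = 0 then none else some (pvPm H (l-1))
def pvSuf (H : List Int) (r : Nat) : Option Int := if r = H.length then none else some (pvSm H r)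

theorem pv_pySetD_neg {α : Type} (xs : List α) (i : Int) (v : α)
    (h1 : -(xs.length:Int) ≤ i) (h2 : i < 0) :
    PySem.List.pySetD xs i v = xs.set ((xs.length:Int) + i).toNat v := by
  simp only [PySem.List.pySetD, PySem.List.pySet?, PySem.List.pyIdx?,
    if_neg (by omega : ¬ (0:Int) ≤ i), if_pos h1, Option.map_some, Option.getD_some]
  congr 1
  omega
theorem pv_pyGetD_neg (xs : List Int) (i : Int) (d : Int)
    (h1 : -(xs.length:Int) ≤ i) (h2 : i < 0) :
    PySem.List.pyGetD xs i d = xs.getD ((xs.length:Int) + i).toNat d := by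
  simp only [PySem.List.pyGetD, PySem.List.pyGet?, PySem.List.pyIdx?,
    if_neg (by omega : ¬ (0:Int) ≤ i), if_pos h1, Option.bind]
  rw [List.getD_eq_getElem?_getD]
  have : xs.length - (-i).toNat = ((xs.length:Int) + i).toNat := by omega
  rw [this]
theorem pv_pyGetD_neg' (xs : List Int) (i j : Int) (d : Int)
    (hij : (xs.length:Int) + i = j) (h2 : i < 0) (h3 : 0 ≤ j) :
    PySem.List.pyGetD xs i d = PySem.List.pyGetD xs j d := by
  simp only [PySem.List.pyGetD, PySem.List.pyGet?, PySem.List.pyIdx?,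
    if_neg (by omega : ¬ (0:Int) ≤ i), if_pos (by omega : -(xs.length:Int) ≤ i),
    if_pos h3, if_pos (by omega : j < (xs.length:Int)), Option.bind]
  have : xs.length - (-i).toNat = j.toNat := by omega
  rw [this]

theorem pv_pySetD_neg' (xs : List Int) (i j : Int) (v : Int)
    (hij : (xs.length:Int) + i = j) (h2 : i < 0) (h3 : 0 ≤ j) :
    PySem.List.pySetD xs i v = PySem.List.pySetD xs j v := by
  simp only [PySem.List.pySetD, PySem.List.pySet?, PySem.List.pyIdx?,
    if_neg (by omega : ¬ (0:Int) ≤ i), if_pos (by omega : -(xs.length:Int) ≤ i),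
    if_pos h3, if_pos (by omega : j < (xs.length:Int)), Option.map_some, Option.getD_some]
  have : xs.length - (-i).toNat = j.toNat := by omega
  rw [this]

theorem pv_read_map_range (f : Nat → Int) (m : Nat) (i : Int) (h0 : 0 ≤ i) (h : i < (m:Int)) :
    PySem.List.pyGetD ((List.range m).map f) i 0 = f i.toNat := by
  rw [PySem.List.pyGetD_eq_getElem _ _ h0 (by simpa using h)]
  simp
theorem pv_set_map_range (f : Nat → Int) (m i : Nat) (v : Int) (h : i < m) :
    ((List.range m).map f).set i v = (List.range m).map (fun j => if j = i then v else f j) := by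
  apply List.ext_getElem (by simp)
  intro j hj hj2
  simp [List.getElem_set]
  split
  · simp_all
  · rename_i hne
    rw [if_neg (by simp at hj2; omega)]
theorem pvSm_step (H : List Int) (k : Nat) (h : k + 1 < H.length) :
    pvSm H k = max (H.getD k 0) (pvSm H (k+1)) := by
  unfold pvSm
  conv_lhs => rw [List.drop_eq_getElem_cons (by omega : k < H.length)]
  rw [List.foldr_cons]
  simp [List.getD_eq_getElem?_getD, List.getElem?_eq_getElem (by omega : k < H.length)]
theorem pvSm_last (H : List Int) (hH : H ≠ []) :
    pvSm H (H.length - 1) = H.getD (H.length - 1) 0 := by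
  unfold pvSm
  have hl : H.length - 1 < H.length := by cases H with | nil => simp_all | cons a t => simp
  conv_lhs => rw [List.drop_eq_getElem_cons hl]
  rw [List.drop_eq_nil_of_le (by omega), List.foldr_cons, List.foldr_nil]
  simp [List.getD_eq_getElem?_getD, List.getElem?_eq_getElem hl]

theorem pv_ls0 (H : List Int) (hH : H ≠ []) :
    PySem.List.pySetD (List.replicate H.length (0:Int)) 0 (PySem.List.pyGetD H 0 0) = pvL H 0 := by
  have hm : 0 < H.length := List.length_pos_of_ne_nil hH
  rw [PySem.List.pySetD_of_nonneg _ _ (by omega)]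
  apply List.ext_getElem (by simp [pvL])
  intro j hj hj2
  simp only [pvL, List.getElem_set, List.getElem_replicate, List.getElem_map, List.getElem_range]
  simp at hj
  rcases Nat.eq_zero_or_pos j with h0 | h0
  · subst h0
    simp [pvPm, PySem.List.pyGetD_zero]
  · rw [if_neg (by omega), if_neg (by omega)]

theorem pv_rs0 (H : List Int) (hH : H ≠ []) :
    PySem.List.pySetD (List.replicate H.length (0:Int)) (-1) (PySem.List.pyGetD H (-1) 0) = pvR H 0 := by
  have hm : 0 < H.length := List.length_pos_of_ne_nil hH
  rw [pv_pySetD_neg _ _ _ (by simp; omega) (by omega),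
      pv_pyGetD_neg _ _ _ (by omega) (by omega)]
  apply List.ext_getElem (by simp [pvR])
  intro j hj hj2
  simp only [pvR, List.getElem_set, List.getElem_replicate, List.getElem_map, List.getElem_range]
  simp at hj
  by_cases hjl : j = H.length - 1
  · subst hjl
    rw [if_pos (by simp; omega), if_pos (by push_cast; omega), pvSm_last H hH]
    congr 1
    omega
  · rw [if_neg (by simp; omega), if_neg (by push_cast; omega)]

theorem pv_max_ite (a b : Int) : (if a > b then a else b) = max b a := by
  split <;> omega

theorem pv_rs_core (H : List Int) (k : Nat) (hm : k + 2 ≤ H.length) :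
    PySem.List.pySetD (pvR H k) ((H.length:Int) - 2 - (k:Int))
      (if PySem.List.pyGetD H ((H.length:Int) - 2 - (k:Int)) 0 >
          PySem.List.pyGetD (pvR H k) ((H.length:Int) - 1 - (k:Int)) 0
       then PySem.List.pyGetD H ((H.length:Int) - 2 - (k:Int)) 0
       else PySem.List.pyGetD (pvR H k) ((H.length:Int) - 1 - (k:Int)) 0) = pvR H (k+1) := by
  have hread1 : PySem.List.pyGetD (pvR H k) ((H.length:Int) - 1 - (k:Int)) 0 = pvSm H (H.length - 1 - k) := by
    rw [pvR, pv_read_map_range _ _ _ (by omega) (by omega)]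
    rw [if_pos (by push_cast; omega)]
    congr 1
    omega
  have hread2 : PySem.List.pyGetD H ((H.length:Int) - 2 - (k:Int)) 0 = H.getD (H.length - 2 - k) 0 := by
    rw [PySem.List.pyGetD_eq_getElem _ _ (by omega) (by push_cast; omega)]
    rw [List.getD_eq_getElem?_getD, List.getElem?_eq_getElem (by omega)]
    congr 1
    omega
  rw [hread1, hread2, PySem.List.pySetD_of_nonneg _ _ (by omega)]
  have hidx : ((H.length:Int) - 2 - (k:Int)).toNat = H.length - 2 - k := by omega
  rw [hidx, pvR, pv_set_map_range _ _ _ _ (by omega)]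
  rw [pvR]
  apply List.map_congr_left
  intro j hj
  simp only [List.mem_range] at hj
  by_cases hj0 : j = H.length - 2 - k
  · subst hj0
    rw [if_pos rfl, pv_max_ite]
    have hc : (H.length:Int) - 1 - ((k+1 : Nat):Int) ≤ ((H.length - 2 - k : Nat):Int) := by
      push_cast; omega
    rw [if_pos hc, pvSm_step H _ (by omega : (H.length - 2 - k) + 1 < H.length)]
    have he : H.length - 2 - k + 1 = H.length - 1 - k := by omega
    rw [he, max_comm]
  · rw [if_neg hj0]
    by_cases hc : (H.length:Int) - 1 - (k:Int) ≤ (j:Int)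
    · rw [if_pos hc, if_pos (by push_cast at hc ⊢; omega)]
    · rw [if_neg hc, if_neg (by push_cast at hc ⊢; omega)]

theorem pv_ls_core (H : List Int) (k : Nat) (hm : k + 2 ≤ H.length) :
    PySem.List.pySetD (pvL H k) (1 + (k:Int))
      (if PySem.List.pyGetD H (1 + (k:Int)) 0 > PySem.List.pyGetD (pvL H k) (1 + (k:Int) - 1) 0
       then PySem.List.pyGetD H (1 + (k:Int)) 0
       else PySem.List.pyGetD (pvL H k) (1 + (k:Int) - 1) 0) = pvL H (k+1) := by
  have hread1 : PySem.List.pyGetD (pvL H k) (1 + (k:Int) - 1) 0 = pvPm H k := by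
    rw [pvL, pv_read_map_range _ _ _ (by omega) (by omega)]
    have he : ((1:Int) + (k:Int) - 1).toNat = k := by omega
    rw [he, if_pos (le_refl k)]
  have hread2 : PySem.List.pyGetD H (1 + (k:Int)) 0 = H.getD (k+1) 0 := by
    rw [PySem.List.pyGetD_eq_getElem _ _ (by omega) (by push_cast; omega)]
    rw [List.getD_eq_getElem?_getD, List.getElem?_eq_getElem (by omega)]
    congr 1
    omega
  rw [hread1, hread2, PySem.List.pySetD_of_nonneg _ _ (by omega)]
  have hidx : ((1:Int) + (k:Int)).toNat = k + 1 := by omega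
  rw [hidx, pvL, pv_set_map_range _ _ _ _ (by omega)]
  rw [pvL]
  apply List.map_congr_left
  intro j hj
  simp only [List.mem_range] at hj
  by_cases hj0 : j = k + 1
  · subst hj0
    rw [if_pos rfl, pv_max_ite, if_pos (le_refl (k+1))]
    simp [pvPm]
  · rw [if_neg hj0]
    by_cases hc : j ≤ k
    · rw [if_pos hc, if_pos (by omega)]
    · rw [if_neg hc, if_neg (by omega)]

theorem pv_loopA (H : List Int) (hH : H ≠ []) (k : Nat) (hk : k ≤ H.length - 1) :
    (PySem.List.pyRange 1 (1 + (k:Int)) 1).foldl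
      (fun (p : List Int × List Int) i =>
        let ls := if PySem.List.pyGetD H i 0 > PySem.List.pyGetD p.1 (i - 1) 0
                  then PySem.List.pySetD p.1 i (PySem.List.pyGetD H i 0)
                  else PySem.List.pySetD p.1 i (PySem.List.pyGetD p.1 (i - 1) 0)
        let rs := if PySem.List.pyGetD H ((H.length:Int) - i - 1) 0 > PySem.List.pyGetD p.2 ((H.length:Int) - i) 0
                  then PySem.List.pySetD p.2 ((H.length:Int) - i - 1) (PySem.List.pyGetD H ((H.length:Int) - i - 1) 0)
                  else PySem.List.pySetD p.2 (-i - 1) (PySem.List.pyGetD p.2 (-i) 0)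
        (ls, rs)) (pvL H 0, pvR H 0) = (pvL H k, pvR H k) := by
  induction k with
  | zero => rw [show ((1:Int) + ((0:Nat):Int)) = 1 by norm_num, PySem.List.pyRange_one_eq_nil (le_refl 1)]; rfl
  | succ k ih =>
    have hm : k + 2 ≤ H.length := by
      have := List.length_pos_of_ne_nil hH; omega
    have hr : PySem.List.pyRange 1 (1 + ((k+1 : Nat):Int)) 1
        = PySem.List.pyRange 1 (1 + (k:Int)) 1 ++ [1 + (k:Int)] := by
      rw [show ((1:Int) + ((k+1 : Nat):Int)) = (1 + (k:Int)) + 1 by push_cast; ring]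
      exact PySem.List.pyRange_one_succ_right (by omega)
    rw [hr, List.foldl_append, ih (by omega)]
    simp only [List.foldl_cons, List.foldl_nil]
    rw [Prod.mk.injEq]
    constructor
    · rw [← apply_ite (PySem.List.pySetD (pvL H k) (1 + (k:Int)))]
      exact pv_ls_core H k hm
    · have hlen : (pvR H k).length = H.length := by simp [pvR]
      have e1 : (H.length:Int) - (1 + (k:Int)) - 1 = (H.length:Int) - 2 - (k:Int) := by ring
      have e2 : (H.length:Int) - (1 + (k:Int)) = (H.length:Int) - 1 - (k:Int) := by ring
      have eneg : PySem.List.pyGetD (pvR H k) (-(1 + (k:Int))) 0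
          = PySem.List.pyGetD (pvR H k) ((H.length:Int) - 1 - (k:Int)) 0 :=
        pv_pyGetD_neg' _ _ _ _ (by rw [hlen]; ring) (by omega) (by omega)
      have esetneg : ∀ v : Int, PySem.List.pySetD (pvR H k) (-(1 + (k:Int)) - 1) v
          = PySem.List.pySetD (pvR H k) ((H.length:Int) - 2 - (k:Int)) v := fun v =>
        pv_pySetD_neg' _ _ _ _ (by rw [hlen]; ring) (by omega) (by omega)
      rw [e1, e2, eneg, esetneg]
      rw [← apply_ite (PySem.List.pySetD (pvR H k) ((H.length:Int) - 2 - (k:Int)))]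
      exact pv_rs_core H k hm

-- ---- generic fold/min? helpers ----
theorem pv_foldl_min_init (l : List Int) (s x : Int) :
    l.foldl min (min s x) = min s (l.foldl min x) := by
  induction l generalizing x with
  | nil => simp
  | cons y t ih => simp only [List.foldl_cons, min_assoc, ih]

theorem pv_foldl_max_init (l : List Int) (s x : Int) :
    l.foldl max (max s x) = max s (l.foldl max x) := by
  induction l generalizing x with
  | nil => simp
  | cons y t ih => simp only [List.foldl_cons, max_assoc, ih]

theorem pv_foldl_min_char (l : List Int) (a : Int) :
    l.foldl min a = match l.min? with | none => a | some m => min a m := by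
  cases l with
  | nil => rfl
  | cons x t =>
    have h2 : (x :: t).min? = some (t.foldl min x) := rfl
    rw [h2, List.foldl_cons]
    exact pv_foldl_min_init t a x

theorem pv_min?_append (xs ys : List Int) :
    (xs ++ ys).min? = match xs.min?, ys.min? with
      | none, o => o
      | some x, none => some x
      | some x, some y => some (min x y) := by
  cases xs with
  | nil => cases ys <;> rfl
  | cons x t =>
    have h1 : (x :: (t ++ ys)).min? = some ((t ++ ys).foldl min x) := rfl
    have h2 : (x :: t).min? = some (t.foldl min x) := rfl
    rw [List.cons_append, h1, h2, List.foldl_append, pv_foldl_min_char ys (t.foldl min x)]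
    cases ys.min? <;> rfl

-- ---- segment maxima ----
theorem pv_seg_single (H : List Int) (a : Nat) (ha : a < H.length) :
    pvSeg H a (a+1) = H.getD a 0 := by
  unfold pvSeg
  rw [show a + 1 - a = 1 by omega, List.drop_eq_getElem_cons ha,
    show (1:Nat) = 0 + 1 by rfl, List.take_succ_cons, List.take_zero, List.foldl_cons,
    List.foldl_nil]
  simp [List.getD_eq_getElem?_getD, List.getElem?_eq_getElem ha]

theorem pv_seg_front (H : List Int) (a b : Nat) (h1 : a + 1 < b) (h2 : b ≤ H.length) :
    pvSeg H a b = max (H.getD a 0) (pvSeg H (a+1) b) := by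
  unfold pvSeg
  have ha : a < H.length := by omega
  have ha1 : a + 1 < H.length := by omega
  rw [List.drop_eq_getElem_cons ha, show b - a = (b - a - 1) + 1 by omega, List.take_succ_cons]
  conv_rhs => rw [List.drop_eq_getElem_cons ha1, show b - (a+1) = (b - a - 1 - 1) + 1 by omega,
    List.take_succ_cons]
  simp only [List.foldl_cons]
  have hga : H.getD a 0 = H[a] := by
    simp [List.getD_eq_getElem?_getD, List.getElem?_eq_getElem ha]
  have hga1 : H.getD (a+1) 0 = H[a+1] := by
    simp [List.getD_eq_getElem?_getD, List.getElem?_eq_getElem ha1]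
  rw [hga, hga1]
  simp only [max_self]
  rw [show b - a - 1 = (b - a - 2) + 1 by omega,
    show H.drop (a+1) = H[a+1] :: H.drop (a+2) from List.drop_eq_getElem_cons ha1,
    List.take_succ_cons, List.foldl_cons, pv_foldl_max_init _ H[a] H[a+1],
    show b - a - 2 + 1 - 1 = b - a - 2 by omega, show a + 1 + 1 = a + 2 from rfl]

theorem pv_seg_back (H : List Int) (a b : Nat) (hab : a ≤ b) (hb : b < H.length) :
    pvSeg H a (b+1) = max (pvSeg H a b) (H.getD b 0) := by
  unfold pvSeg
  have hget : (H.drop a)[b - a]? = some H[b] := by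
    rw [List.getElem?_drop, show a + (b - a) = b by omega, List.getElem?_eq_getElem hb]
  rw [show b + 1 - a = (b - a) + 1 by omega, List.take_add_one, hget, Option.toList_some,
    List.foldl_append, List.foldl_cons, List.foldl_nil]
  congr 1
  simp [List.getD_eq_getElem?_getD, List.getElem?_eq_getElem hb]

theorem pv_seg_max? (H : List Int) (a b : Nat) (h1 : a < b) (h2 : b ≤ H.length) :
    PySem.List.max? ((H.drop a).take (b - a)) (fun y => y) = some (pvSeg H a b) := by
  have ha : a < H.length := by omega
  rw [show H.drop a = H[a] :: H.drop (a+1) from List.drop_eq_getElem_cons ha,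
    show b - a = (b - a - 1) + 1 by omega, List.take_succ_cons, PySem.List.max?_id_cons]
  unfold pvSeg
  rw [show H.drop a = H[a] :: H.drop (a+1) from List.drop_eq_getElem_cons ha,
    show b - a = (b - a - 1) + 1 by omega, List.take_succ_cons, List.foldl_cons,
    show H.getD a 0 = H[a] by simp [List.getD_eq_getElem?_getD, List.getElem?_eq_getElem ha],
    max_self, show b - a - 1 + 1 - 1 = b - a - 1 by omega]

-- prefix/suffix maxima decompose over a segment
theorem pv_pm_seg (H : List Int) (a b : Nat) (h1 : a < b) (h2 : b ≤ H.length) :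
    pvPm H (b-1) = match pvPre H a with
      | none => pvSeg H a b
      | some x => max x (pvSeg H a b) := by
  induction b with
  | zero => omega
  | succ b ih =>
    rcases Nat.lt_or_ge a b with hab | hab
    · -- step: a < b, so b ≥ a+1 and the IH applies at b
      have hb1 : 1 ≤ b := by omega
      have hpm : pvPm H b = max (pvPm H (b-1)) (H.getD b 0) := by
        cases b with
        | zero => omega
        | succ k => simp [pvPm]
      rw [show b + 1 - 1 = b by omega, hpm, ih hab (by omega),
        pv_seg_back H a b (by omega) (by omega)]
      by_cases h0 : a = 0
      · simp only [pvPre, if_pos h0]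
      · simp only [pvPre, if_neg h0]
        rw [max_assoc]
    · -- base: b = a (window is [a, a+1))
      have hba : b = a := by omega
      subst hba
      rw [show b + 1 - 1 = b by omega, pv_seg_single H b (by omega)]
      by_cases h0 : b = 0
      · subst h0
        rfl
      · simp only [pvPre, if_neg h0]
        cases b with
        | zero => omega
        | succ k =>
          simp only [Nat.add_sub_cancel]
          rfl

theorem pv_sm_seg (H : List Int) (a b : Nat) (h1 : a < b) (h2 : b ≤ H.length) :
    pvSm H a = match pvSuf H b with
      | none => pvSeg H a b
      | some x => max x (pvSeg H a b) := by
  obtain ⟨k, hk⟩ : ∃ k, b = a + k + 1 := ⟨b - a - 1, by omega⟩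
  subst hk
  clear h1
  induction k generalizing a with
  | zero =>
    simp only [Nat.add_zero] at h2 ⊢
    rw [pv_seg_single H a (by omega)]
    by_cases h0 : a + 1 = H.length
    · simp only [pvSuf, if_pos h0]
      have hne : H ≠ [] := by
        intro hnil
        rw [hnil] at h2
        simp at h2
      have ha : a = H.length - 1 := by omega
      rw [ha, pvSm_last H hne]
    · simp only [pvSuf, if_neg h0]
      rw [pvSm_step H a (by omega), max_comm]
  | succ k ih =>
    rw [pvSm_step H a (by omega)]
    have hih := ih (a+1) (by omega)
    rw [show a + 1 + k + 1 = a + (k+1) + 1 by omega] at hih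
    rw [hih, pv_seg_front H a (a + (k+1) + 1) (by omega) (by omega)]
    by_cases h0 : a + (k+1) + 1 = H.length
    · simp only [pvSuf, if_pos h0]
    · simp only [pvSuf, if_neg h0]
      rw [max_left_comm]

-- pvBest over (l,r) decomposes at an interior point m into the two halves and the cost at m
theorem pv_best_split (H : List Int) (l m r : Nat) (h1 : l < m) (h2 : m < r) :
    pvBest H l r = some (
      match pvBest H m r with
      | none => (match pvBest H l m with
                 | none => pvCost H m
                 | some x => min (pvCost H m) x)
      | some y => min (match pvBest H l m with
                       | none => pvCost H m
                       | some x => min (pvCost H m) x) y) := by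
  unfold pvBest
  have hsplit : List.range' (l+1) (r - l - 1) =
      List.range' (l+1) (m - l - 1) ++ (m :: List.range' (m+1) (r - m - 1)) := by
    have h := List.range'_append (s := l+1) (m := m - l - 1) (n := r - m) (step := 1)
    rw [show (l+1) + 1 * (m - l - 1) = m by omega, show (m - l - 1) + (r - m) = r - l - 1 by omega] at h
    rw [← h, show r - m = (r - m - 1) + 1 by omega, List.range'_succ,
      show r - m - 1 + 1 - 1 = r - m - 1 by omega]
  rw [hsplit, List.map_append, List.map_cons, pv_min?_append,
    show ((pvCost H m :: (List.range' (m+1) (r - m - 1)).map (pvCost H)).min?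
      = some (((List.range' (m+1) (r - m - 1)).map (pvCost H)).foldl min (pvCost H m))) from rfl,
    pv_foldl_min_char]
  rcases hA : ((List.range' (l+1) (m - l - 1)).map (pvCost H)).min? with _ | x <;>
    rcases hB : ((List.range' (m+1) (r - m - 1)).map (pvCost H)).min? with _ | y <;>
      simp only [] <;>
        first
          | rfl
          | (refine congrArg some ?_; simp only [min_comm, min_left_comm])

-- ---- the divide-and-conquer recursion computes pvBest ----
theorem pv_goB_spec (H : List Int) (fuel l r : Nat) (h1 : l < r) (h2 : r ≤ H.length)
    (hf : r - l ≤ fuel) :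
    goB H (H.length:Int) fuel (l:Int) (r:Int) (pvPre H l) (pvSuf H r) = pvBest H l r := by
  induction fuel generalizing l r with
  | zero => omega
  | succ fuel ih =>
    simp only [goB]
    by_cases hsmall : r = l + 1
    · rw [if_pos (by omega : (r:Int) - (l:Int) ≤ 1)]
      unfold pvBest
      rw [show r - l - 1 = 0 from by omega, List.range'_zero, List.map_nil]
      rfl
    · rw [if_neg (by omega : ¬ ((r:Int) - (l:Int) ≤ 1))]
      have hmid : PySem.Int.floordiv ((l:Int) + (r:Int)) 2 = (((l + r) / 2 : Nat) : Int) := by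
        rw [show ((l:Int) + (r:Int)) = (((l + r : Nat)) : Int) by push_cast; ring,
          PySem.Int.floordiv_eq_ediv_of_pos (by norm_num)]
        omega
      set m : Nat := (l + r) / 2 with hm
      have hlm : l < m := by omega
      have hmr : m < r := by omega
      simp only [hmid]
      rw [PySem.List.slice_natCast H l m, PySem.List.slice_natCast H m r,
        pv_seg_max? H l m hlm (by omega), pv_seg_max? H m r hmr h2]
      simp only [Option.getD_some]
      have hp : (match pvPre H l with
                 | none => pvSeg H l m
                 | some x => max x (pvSeg H l m)) = pvPm H (m - 1) :=
        (pv_pm_seg H l m hlm (by omega)).symm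
      have hs : (match pvSuf H r with
                 | none => pvSeg H m r
                 | some x => max x (pvSeg H m r)) = pvSm H m :=
        (pv_sm_seg H m r hmr h2).symm
      rw [hp, hs]
      have hc : pvPm H (m - 1) * (m:Int) + pvSm H m * ((H.length:Int) - (m:Int)) = pvCost H m := rfl
      rw [hc]
      have hbl : goB H (H.length:Int) fuel (l:Int) (m:Int) (pvPre H l) (some (pvSm H m))
          = pvBest H l m := by
        have : some (pvSm H m) = pvSuf H m := by
          unfold pvSuf
          rw [if_neg (by omega : ¬ m = H.length)]
        rw [this]
        exact ih l m hlm (by omega) (by omega)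
      have hbr : goB H (H.length:Int) fuel (m:Int) (r:Int) (some (pvPm H (m - 1))) (pvSuf H r)
          = pvBest H m r := by
        have : some (pvPm H (m - 1)) = pvPre H m := by
          unfold pvPre
          rw [if_neg (by omega : ¬ m = 0)]
        rw [this]
        exact ih m r hmr h2 (by omega)
      rw [hbl, hbr, pv_best_split H l m r hlm hmr]

-- ---- A's result as a min? over the costs ----
theorem pv_fold_min_map (xs : List Int) (F : Int → Int) (a : Int) :
    xs.foldl (fun res i => min res (F i)) a =
      match (xs.map F).min? with | none => a | some m => min a m := by
  rw [← pv_foldl_min_char]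
  exact (List.foldl_map (f := F) (g := min) (l := xs) (init := a)).symm

theorem pv_A_char (H : List Int) (hH : H ≠ []) :
    solution H = match pvBest H 0 H.length with
      | none => pvSm H 0 * (H.length:Int)
      | some v => min (pvSm H 0 * (H.length:Int)) v := by
  have hm : 0 < H.length := List.length_pos_of_ne_nil hH
  have hNn : ((H.length:Int)).toNat = H.length := by omega
  have e1 : (1 : Int) + ((H.length - 1 : Nat):Int) = (H.length:Int) := by omega
  have hloopA := pv_loopA H hH (H.length - 1) (le_refl _)
  rw [e1] at hloopA
  simp only [solution, PySem.List.len_eq, hNn]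
  rw [pv_ls0 H hH, pv_rs0 H hH, hloopA]
  have hinit : PySem.List.pyGetD (pvR H (H.length - 1)) 0 0 = pvSm H 0 := by
    rw [pvR, pv_read_map_range _ _ _ (le_refl 0) (by omega)]
    rw [Int.toNat_zero, if_pos (by push_cast; omega)]
  rw [hinit]
  rw [pv_fold_min_map (PySem.List.pyRange 1 (H.length:Int) 1)
    (fun i => PySem.List.pyGetD (pvL H (H.length - 1)) (i - 1) 0 * i +
      PySem.List.pyGetD (pvR H (H.length - 1)) i 0 * ((H.length:Int) - i))
    (pvSm H 0 * (H.length:Int))]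
  have hmap : (PySem.List.pyRange 1 (H.length:Int) 1).map
      (fun i => PySem.List.pyGetD (pvL H (H.length - 1)) (i - 1) 0 * i +
        PySem.List.pyGetD (pvR H (H.length - 1)) i 0 * ((H.length:Int) - i))
      = (List.range' 1 (H.length - 1)).map (pvCost H) := by
    rw [PySem.List.pyRange_one 1 (H.length:Int),
      show ((H.length:Int) - 1).toNat = H.length - 1 by omega,
      List.map_map, List.range'_eq_map_range, List.map_map]
    apply List.map_congr_left
    intro k hk
    simp only [List.mem_range] at hk
    simp only [Function.comp]
    have hL : PySem.List.pyGetD (pvL H (H.length - 1)) (1 + (k:Int) - 1) 0 = pvPm H k := by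
      rw [show (1:Int) + (k:Int) - 1 = (k:Int) by ring, pvL,
        pv_read_map_range _ _ _ (by omega) (by omega), Int.toNat_natCast,
        if_pos (by omega : k ≤ H.length - 1)]
    have hR : PySem.List.pyGetD (pvR H (H.length - 1)) (1 + (k:Int)) 0 = pvSm H (1 + k) := by
      rw [show (1:Int) + (k:Int) = (((1 + k : Nat)):Int) by push_cast; ring, pvR,
        pv_read_map_range _ _ _ (by omega) (by omega), Int.toNat_natCast,
        if_pos (by push_cast; omega)]
    rw [hL, hR]
    unfold pvCost
    rw [show 1 + k - 1 = k by omega]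
    push_cast
    ring
  rw [hmap]
  rfl

theorem pv_max_H (H : List Int) (hH : H ≠ []) :
    (PySem.List.max? H (fun y => y)).getD 0 = pvSm H 0 := by
  cases H with
  | nil => exact absurd rfl hH
  | cons x t =>
    rw [PySem.List.max?_id_cons, Option.getD_some]
    have h := pv_sm_seg (x :: t) 0 (x :: t).length (by simp) (le_refl _)
    rw [show pvSuf (x :: t) (x :: t).length = none from by unfold pvSuf; rw [if_pos rfl]] at h
    rw [h]
    unfold pvSeg
    rw [List.drop_zero, Nat.sub_zero, List.take_length, List.foldl_cons]
    rw [show (x :: t).getD 0 0 = x from rfl, max_self]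

theorem pv_main (H : List Int) (hH : H ≠ []) : solution H = solution_alt H := by
  have hm : 0 < H.length := List.length_pos_of_ne_nil hH
  have hNn : ((H.length:Int)).toNat = H.length := by omega
  have hgo := pv_goB_spec H H.length 0 H.length hm (le_refl _) (by omega)
  rw [show pvPre H 0 = none from by unfold pvPre; rw [if_pos rfl],
    show pvSuf H H.length = none from by unfold pvSuf; rw [if_pos rfl],
    Nat.cast_zero] at hgo
  simp only [solution_alt, PySem.List.len_eq, hNn]
  rw [pv_max_H H hH, hgo, pv_A_char H hH]

-- ===== VERDICT (by name: the statement is the Claim_ definition above) =====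
theorem solution_spec : Claim_equal_solution := by
  intro H _ hPre
  unfold Spec_solution
  exact pv_main H hPre
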